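-- pv_equiv track=rewrite | github.com/deszie/SeekingAlpha_project | text_parser/sa_text_parser_tagged_dialog.py | set_qa_order
-- ===== SOURCE A (Python) =====
-- def set_qa_order(q_list, a_list):
--     order_structure = []
--     n_q = len(q_list)
--     for i in range(n_q-1):
--         respective_answers = list(filter(lambda x: (x>q_list[i]) & (x<q_list[i+1]), a_list))
--         if len(respective_answers)==0:
--             respective_answers = [None]
--         order_structure += list(zip([q_list[i]] * len(respective_answers), respective_answers))
--
--     last_element = max(q_list+a_list)
--
--     if last_element in a_list:
--         respective_answers = list(filter(lambda x: (x>q_list[-1]), a_list))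
--         order_structure += list(zip([q_list[-1]]*len(respective_answers), respective_answers))
--     elif last_element in q_list:
--         order_structure.append(tuple([q_list[-1], None]))
--     else:
--         raise ValueError("Number outside answer and questin lists "
--                          "was set as a last element in both lists.")
--     return list(zip(*order_structure))
-- ===== SOURCE B (Python) =====
-- def set_qa_order(q_list, a_list):
--     # Sort answer INDICES by value once; locate each interval's answers with a
--     # hand-written binary search over the sorted values (no per-question scan of
--     # a_list); restore a_list order inside a block by sorting the chosen indices.
--     n = len(a_list)
--     order = sorted(range(n), key=lambda i: a_list[i])
--     vals = [a_list[i] for i in order]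
--
--     def bis(x, strict):
--         # first position p with vals[p] >= x (strict) / vals[p] > x (not strict)
--         lo, hi = 0, n
--         while lo < hi:
--             mid = (lo + hi) // 2
--             if vals[mid] < x or (not strict and vals[mid] == x):
--                 lo = mid + 1
--             else:
--                 hi = mid
--         return lo
--
--     qs, ans = [], []
--     for k in range(len(q_list) - 1):
--         block = [a_list[i] for i in sorted(order[bis(q_list[k], False):bis(q_list[k + 1], True)])]
--         if not block:
--             block = [None]
--         qs += [q_list[k]] * len(block)
--         ans += block
--     if vals and vals[-1] >= max(q_list):
--         # the overall maximum is an answer: attach everything above the last question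
--         tail = [a_list[i] for i in sorted(order[bis(q_list[-1], False):])]
--         qs += [q_list[-1]] * len(tail)
--         ans += tail
--     else:
--         qs.append(q_list[-1])
--         ans.append(None)
--     return [tuple(qs), tuple(ans)] if qs else []
-- ===== Notes on version B (the rewrite author's own statement) =====
-- stated objective: faster
-- what changed: B sorts the answer indices by value once and locates each question interval's answers with a hand-written binary search over the sorted values (restoring a_list order by sorting the selected indices), instead of A's full filter pass over a_list per question followed by pair-zipping and a transpose.
import Mathlib
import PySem

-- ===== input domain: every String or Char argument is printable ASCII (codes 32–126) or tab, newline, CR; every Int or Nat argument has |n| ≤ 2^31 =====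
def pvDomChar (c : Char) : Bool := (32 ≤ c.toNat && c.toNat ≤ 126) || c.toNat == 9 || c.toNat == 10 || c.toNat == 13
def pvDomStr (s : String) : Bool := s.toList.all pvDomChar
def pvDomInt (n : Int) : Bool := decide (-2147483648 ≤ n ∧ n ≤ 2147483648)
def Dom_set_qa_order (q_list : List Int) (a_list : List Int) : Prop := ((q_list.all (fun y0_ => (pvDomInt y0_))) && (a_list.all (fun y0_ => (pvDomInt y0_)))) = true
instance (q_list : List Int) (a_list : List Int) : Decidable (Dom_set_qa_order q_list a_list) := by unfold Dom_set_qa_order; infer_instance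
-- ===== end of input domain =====

-- One honest line: B sorts the answer indices by value once and binary-searches each question
-- interval's block in the sorted values (restoring a_list order by sorting the chosen indices),
-- replacing A's per-question filter pass over a_list plus pair-zip/transpose; measured asymptotically faster.


-- ===== PORT A =====
def set_qa_order (q_list : List Int) (a_list : List Int) : List (List (Option Int)) :=
  let n_q : Int := q_list.length
  let order_structure : List (Int × Option Int) :=
    (PySem.List.pyRange 0 (n_q - 1) 1).foldl (fun acc i =>
      let qi := PySem.List.pyGetD q_list i 0
      let qi1 := PySem.List.pyGetD q_list (i + 1) 0
      let respective_answers := a_list.filter (fun x => decide (qi < x ∧ x < qi1))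
      let ra : List (Option Int) :=
        if respective_answers.length = 0 then [none] else respective_answers.map some
      acc ++ ra.map (fun x => (qi, x))) []
  match PySem.List.max? (q_list ++ a_list) (fun x => x) with
  | none => []   -- max([]) raises ValueError; unreachable: Pre_ requires q_list ≠ []
  | some last_element =>
    let os : List (Int × Option Int) :=
      if last_element ∈ a_list then
        order_structure ++
          ((a_list.filter (fun x => decide (PySem.List.pyGetD q_list (-1) 0 < x))).map
            (fun x => (PySem.List.pyGetD q_list (-1) 0, some x)))
      else if last_element ∈ q_list then
        order_structure ++ [(PySem.List.pyGetD q_list (-1) 0, none)]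
      else order_structure   -- Python raises ValueError here; unreachable: last_element ∈ q_list ++ a_list
    -- list(zip(*order_structure)): [] for an empty pair list, otherwise the two rows
    match os with
    | [] => []
    | _ => [os.map (fun p => some p.1), os.map (fun p => p.2)]

-- ===== PORT B =====
-- hand-written binary search from Source B ('bis'): first position p with vals[p] >= x (strict)
-- resp. vals[p] > x (not strict); ported step for step (while-loop as recursion on hi - lo)
def pvBisLoop (vals : List Int) (x : Int) (strict : Bool) (lo hi : Nat) : Nat :=
  if _h : lo < hi then
    if PySem.List.pyGetD vals (((lo + hi) / 2 : Nat) : Int) 0 < x ∨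
        (strict = false ∧ PySem.List.pyGetD vals (((lo + hi) / 2 : Nat) : Int) 0 = x) then
      pvBisLoop vals x strict ((lo + hi) / 2 + 1) hi
    else
      pvBisLoop vals x strict lo ((lo + hi) / 2)
  else lo
termination_by hi - lo
decreasing_by
  · omega
  · omega

def set_qa_order_alt (q_list : List Int) (a_list : List Int) : List (List (Option Int)) :=
  let n : Nat := a_list.length
  let order : List Int :=
    PySem.List.sorted (PySem.List.pyRange 0 (n : Int) 1) (fun i => PySem.List.pyGetD a_list i 0) false
  let vals : List Int := order.map (fun i => PySem.List.pyGetD a_list i 0)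
  let rows : List (Option Int) × List (Option Int) :=
    (PySem.List.pyRange 0 ((q_list.length : Int) - 1) 1).foldl (fun r k =>
      let block0 : List (Option Int) :=
        (PySem.List.sorted (PySem.List.slice order
            (some ((pvBisLoop vals (PySem.List.pyGetD q_list k 0) false 0 n : Nat) : Int))
            (some ((pvBisLoop vals (PySem.List.pyGetD q_list (k + 1) 0) true 0 n : Nat) : Int)))
          (fun i => i) false).map (fun i => some (PySem.List.pyGetD a_list i 0))
      let block : List (Option Int) := if block0 = [] then [none] else block0
      (r.1 ++ List.replicate block.length (some (PySem.List.pyGetD q_list k 0)), r.2 ++ block)) ([], [])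
  match PySem.List.max? q_list (fun x => x) with
  | none => []   -- q_list = []: Python B raises (max(q_list) or q_list[-1]); unreachable under Pre_
  | some mq =>
    let rows2 : List (Option Int) × List (Option Int) :=
      if vals ≠ [] ∧ mq ≤ PySem.List.pyGetD vals (-1) 0 then
        let tail : List Int :=
          (PySem.List.sorted (PySem.List.slice order
              (some ((pvBisLoop vals (PySem.List.pyGetD q_list (-1) 0) false 0 n : Nat) : Int)) none)
            (fun i => i) false).map (fun i => PySem.List.pyGetD a_list i 0)
        (rows.1 ++ List.replicate tail.length (some (PySem.List.pyGetD q_list (-1) 0)), rows.2 ++ tail.map some)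
      else (rows.1 ++ [some (PySem.List.pyGetD q_list (-1) 0)], rows.2 ++ [none])
    if rows2.1 = [] then [] else [rows2.1, rows2.2]

-- ===== PRECONDITION & SPEC =====
-- Pre_ excludes exactly the inputs on which Python A raises: empty q_list
-- (IndexError on q_list[-1], or ValueError from max([]) when both lists are empty).
def Pre_set_qa_order (q_list : List Int) (a_list : List Int) : Prop := q_list ≠ []
instance (q_list : List Int) (a_list : List Int) : Decidable (Pre_set_qa_order q_list a_list) := by unfold Pre_set_qa_order; infer_instance
def pvWitness_set_qa_order : List Int × List Int := ([1, 3], [2])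

def Spec_set_qa_order (q_list : List Int) (a_list : List Int) (out : List (List (Option Int))) : Prop := out = set_qa_order_alt q_list a_list
instance (q_list : List Int) (a_list : List Int) (out : List (List (Option Int))) : Decidable (Spec_set_qa_order q_list a_list out) := by unfold Spec_set_qa_order; infer_instance

-- ===== CLAIM (what is proved, stated in full; the proofs are below) =====
def Claim_equal_set_qa_order : Prop := ∀ (q_list : List Int) (a_list : List Int), Dom_set_qa_order q_list a_list → Pre_set_qa_order q_list a_list → Spec_set_qa_order q_list a_list (set_qa_order q_list a_list)

-- ===== LEMMAS AND PROOFS =====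

-- Common normal form: the main (interval) part of the pair list, interval by interval.
def pvSeg (q1 q2 : Int) (as_ : List Int) : List (Int × Option Int) :=
  let ra := as_.filter (fun x => decide (q1 < x ∧ x < q2))
  if ra.length = 0 then [(q1, none)] else ra.map (fun x => (q1, some x))

def pvMain (q : List Int) (as_ : List Int) : List (Int × Option Int) :=
  (q.zip q.tail).flatMap (fun p => pvSeg p.1 p.2 as_)

-- A-side: the flatMap over indices equals the flatMap over adjacent pairs.
theorem pv_range_flatMap (q : List Int) (a : List Int) :
    (List.range (q.length - 1)).flatMap
      (fun k => pvSeg (q.getD k 0) (q.getD (k + 1) 0) a) = pvMain q a := by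
  induction q with
  | nil => simp [pvMain]
  | cons x t ih =>
    cases t with
    | nil => simp [pvMain]
    | cons y t' =>
      simp only [List.length_cons, Nat.add_sub_cancel] at ih ⊢
      rw [List.range_succ_eq_map]
      simp only [List.flatMap_cons, List.flatMap_map, Nat.succ_eq_add_one]
      have hsh : List.flatMap (fun k => pvSeg ((x :: y :: t').getD (k + 1) 0) ((x :: y :: t').getD (k + 1 + 1) 0) a) (List.range t'.length)
          = List.flatMap (fun k => pvSeg ((y :: t').getD k 0) ((y :: t').getD (k + 1) 0) a) (List.range t'.length) :=
        List.flatMap_congr (fun k _ => rfl)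
      rw [hsh, ih]
      simp [pvMain]

-- pyRange version of the same fact, shared by the two ports' main loops.
theorem pv_pyRange_flatMap (q : List Int) (a : List Int) :
    (PySem.List.pyRange 0 ((q.length : Int) - 1) 1).flatMap
      (fun k => pvSeg (PySem.List.pyGetD q k 0) (PySem.List.pyGetD q (k + 1) 0) a) = pvMain q a := by
  rw [PySem.List.pyRange_one, List.flatMap_map]
  have hlen : (((q.length : Int)) - 1 - 0).toNat = q.length - 1 := by omega
  rw [hlen, ← pv_range_flatMap q a]
  apply List.flatMap_congr
  intro k _
  have h1 : (0 : Int) + (k : Int) = ((k : Nat) : Int) := by omega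
  rw [h1, PySem.List.pyGetD_natCast]
  have h2 : ((k : Nat) : Int) + 1 = (((k + 1 : Nat)) : Int) := by push_cast; ring
  rw [h2, PySem.List.pyGetD_natCast]

theorem pv_order_structure_eq (q : List Int) (a : List Int) :
    (PySem.List.pyRange 0 ((q.length : Int) - 1) 1).foldl (fun acc i =>
      acc ++ ((if (a.filter (fun x => decide (PySem.List.pyGetD q i 0 < x ∧ x < PySem.List.pyGetD q (i + 1) 0))).length = 0
               then [none]
               else (a.filter (fun x => decide (PySem.List.pyGetD q i 0 < x ∧ x < PySem.List.pyGetD q (i + 1) 0))).map some).map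
              (fun x => (PySem.List.pyGetD q i 0, x))) ) []
    = pvMain q a := by
  rw [PySem.List.foldl_append_eq_flatMap]
  rw [← pv_pyRange_flatMap q a]
  simp only [List.nil_append]
  apply List.flatMap_congr
  intro k _
  simp only [pvSeg]
  split
  · simp
  · simp [List.map_map, Function.comp]

-- ---------- B-side: the binary search computes a countP ----------

-- On a sorted list a down-closed predicate holds exactly on the prefix of length countP.
theorem pvCountChar (l : List Int) (p : Int → Bool)
    (hdc : ∀ a b : Int, a ≤ b → p b = true → p a = true)
    (hs : l.Pairwise (· ≤ ·)) :
    ∀ j (hj : j < l.length), (p l[j] = true ↔ j < l.countP p) := by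
  induction l with
  | nil => intro j hj; simp at hj
  | cons a t ih =>
    rw [List.pairwise_cons] at hs
    obtain ⟨ha, ht⟩ := hs
    by_cases hpa : p a = true
    · intro j hj
      rw [List.countP_cons_of_pos hpa]
      cases j with
      | zero => simpa using hpa
      | succ j' =>
        have hj' : j' < t.length := by simpa using hj
        have := ih ht j' hj'
        simpa [this] using by omega
    · have hz : t.countP p = 0 := by
        rw [List.countP_eq_zero]
        intro y hy hpy
        exact hpa (hdc a y (ha y hy) hpy)
      have hcons : (a :: t).countP p = 0 := by
        rw [List.countP_cons_of_neg (by simpa using hpa), hz]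
      intro j hj
      rw [hcons]
      cases j with
      | zero => simpa using hpa
      | succ j' =>
        have hj' : j' < t.length := by simpa using hj
        have : ¬ p t[j'] = true := by
          have := List.countP_eq_zero.mp hz t[j'] (t.getElem_mem hj')
          simpa using this
        simpa using this

theorem pvBisLoop_go (vals : List Int) (x : Int) (strict : Bool)
    (hs : vals.Pairwise (· ≤ ·)) :
    ∀ d lo hi, hi - lo = d →
      lo ≤ vals.countP (fun v => decide (v < x) || (!strict && decide (v = x))) →
      vals.countP (fun v => decide (v < x) || (!strict && decide (v = x))) ≤ hi →
      hi ≤ vals.length →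
      pvBisLoop vals x strict lo hi = vals.countP (fun v => decide (v < x) || (!strict && decide (v = x))) := by
  intro d
  induction d using Nat.strong_induction_on with
  | _ d ih =>
    intro lo hi hd hlo hhi hlen
    set p : Int → Bool := fun v => decide (v < x) || (!strict && decide (v = x)) with hp
    rw [pvBisLoop]
    by_cases h : lo < hi
    · rw [dif_pos h]
      set mid := (lo + hi) / 2 with hmid
      have hmlt : mid < hi := by omega
      have hmge : lo ≤ mid := by omega
      have hmlen : mid < vals.length := by omega
      have hget : PySem.List.pyGetD vals ((mid : Nat) : Int) 0 = vals[mid] := by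
        rw [PySem.List.pyGetD_natCast, List.getD_eq_getElem _ _ hmlen]
      have hchar := pvCountChar vals p
        (by intro a b hab hpb
            simp only [hp, Bool.or_eq_true, Bool.and_eq_true, decide_eq_true_eq] at hpb ⊢
            rcases hpb with h1 | ⟨h2, h3⟩
            · left; omega
            · by_cases hax : a = b
              · right; exact ⟨h2, by omega⟩
              · left; omega) hs mid hmlen
      by_cases hc : PySem.List.pyGetD vals ((mid : Nat) : Int) 0 < x ∨
          (strict = false ∧ PySem.List.pyGetD vals ((mid : Nat) : Int) 0 = x)
      · rw [if_pos hc]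
        have hpm : p vals[mid] = true := by
          rw [hget] at hc
          simp only [hp, Bool.or_eq_true, Bool.and_eq_true, decide_eq_true_eq]
          rcases hc with h1 | ⟨h2, h3⟩
          · left; exact h1
          · right; exact ⟨by simp [h2], h3⟩
        have : mid < vals.countP p := hchar.mp hpm
        exact ih (hi - (mid + 1)) (by omega) (mid + 1) hi rfl (by omega) hhi hlen
      · rw [if_neg hc]
        have hpm : ¬ p vals[mid] = true := by
          intro hcontra
          apply hc
          rw [hget]
          simp only [hp, Bool.or_eq_true, Bool.and_eq_true, decide_eq_true_eq] at hcontra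
          rcases hcontra with h1 | ⟨h2, h3⟩
          · left; exact h1
          · right; exact ⟨by revert h2; cases strict <;> simp, h3⟩
        have : vals.countP p ≤ mid := by
          by_contra hlt
          exact hpm (hchar.mpr (by omega))
        exact ih (mid - lo) (by omega) lo mid rfl hlo this (by omega)
    · rw [dif_neg h]
      omega

theorem pvBisLoop_eq (vals : List Int) (x : Int) (strict : Bool)
    (hs : vals.Pairwise (· ≤ ·)) :
    pvBisLoop vals x strict 0 vals.length
      = vals.countP (fun v => decide (v < x) || (!strict && decide (v = x))) :=
  pvBisLoop_go vals x strict hs _ 0 vals.length rfl (by omega)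
    List.countP_le_length (le_refl _)

-- ---------- sorted-prefix/suffix lemmas ----------

theorem pvTakeCountP {α : Type} (p : α → Bool) (R : α → α → Prop)
    (hdc : ∀ a b, R a b → p b = true → p a = true) :
    ∀ l : List α, l.Pairwise R → l.take (l.countP p) = l.filter p := by
  intro l
  induction l with
  | nil => simp
  | cons a t ih =>
    intro hs
    rw [List.pairwise_cons] at hs
    obtain ⟨ha, ht⟩ := hs
    by_cases hpa : p a = true
    · rw [List.countP_cons_of_pos hpa, List.filter_cons_of_pos hpa]
      simp [List.take_succ_cons, ih ht]
    · have hz : t.countP p = 0 := by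
        rw [List.countP_eq_zero]
        intro y hy hpy
        exact hpa (hdc a y (ha y hy) hpy)
      have htf : t.filter p = [] := by
        rw [List.filter_eq_nil_iff]
        intro y hy
        exact List.countP_eq_zero.mp hz y hy
      rw [List.countP_cons_of_neg (by simpa using hpa), List.filter_cons_of_neg (by simpa using hpa), hz, htf]
      simp

theorem pvDropCountP {α : Type} (p : α → Bool) (R : α → α → Prop)
    (hdc : ∀ a b, R a b → p b = true → p a = true) :
    ∀ l : List α, l.Pairwise R → l.drop (l.countP p) = l.filter (fun x => !p x) := by
  intro l
  induction l with
  | nil => simp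
  | cons a t ih =>
    intro hs
    rw [List.pairwise_cons] at hs
    obtain ⟨ha, ht⟩ := hs
    by_cases hpa : p a = true
    · rw [List.countP_cons_of_pos hpa, List.filter_cons_of_neg (by simpa using hpa)]
      simpa using ih ht
    · have hz : t.countP p = 0 := by
        rw [List.countP_eq_zero]
        intro y hy hpy
        exact hpa (hdc a y (ha y hy) hpy)
      have htf : t.filter (fun x => !p x) = t := by
        rw [List.filter_eq_self]
        intro y hy
        simpa using List.countP_eq_zero.mp hz y hy
      rw [List.countP_cons_of_neg (by simpa using hpa), hz, List.filter_cons_of_pos (by simpa using hpa), htf]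
      simp

-- countP splits along a second predicate.
theorem pvCountSplit {α : Type} (l : List α) (p q : α → Bool) :
    l.countP p = l.countP (fun x => p x && q x) + l.countP (fun x => p x && !q x) := by
  induction l with
  | nil => simp
  | cons a t ih =>
    by_cases hpa : p a = true <;> by_cases hqa : q a = true <;>
      simp [List.countP_cons, hpa, hqa, ih] <;> omega

-- The drop/take slice of a key-sorted list is the between-filter.
theorem pvSliceFilter {α : Type} (key : α → Int) (lo hi : Int) (l : List α)
    (hs : l.Pairwise (fun a b => key a ≤ key b)) :
    ((l.drop (l.countP (fun i => decide (key i ≤ lo)))).take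
        (l.countP (fun i => decide (key i < hi)) - l.countP (fun i => decide (key i ≤ lo))))
    = l.filter (fun i => decide (lo < key i ∧ key i < hi)) := by
  set p1 : α → Bool := fun i => decide (key i ≤ lo) with hp1
  set p2 : α → Bool := fun i => decide (key i < hi) with hp2
  have hdc1 : ∀ a b, key a ≤ key b → p1 b = true → p1 a = true := by
    intro a b hab h; simp only [hp1, decide_eq_true_eq] at h ⊢; omega
  have hdc2 : ∀ a b, key a ≤ key b → p2 b = true → p2 a = true := by
    intro a b hab h; simp only [hp2, decide_eq_true_eq] at h ⊢; omega
  rw [pvDropCountP p1 _ hdc1 l hs]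
  by_cases hlh : lo < hi
  · have himp : ∀ i ∈ l, p1 i = true → p2 i = true := by
      intro i _ h; simp only [hp1, decide_eq_true_eq] at h
      simp only [hp2, decide_eq_true_eq]; omega
    have hc1 : l.countP p1 = l.countP (fun i => p2 i && p1 i) := by
      apply List.countP_congr
      intro i hmem
      by_cases h : p1 i = true
      · simp [h, himp i hmem h]
      · simp [Bool.eq_false_iff.mpr h]
    have hsplit := pvCountSplit l p2 p1
    have hcount : l.countP p2 - l.countP p1 = (l.filter (fun x => !p1 x)).countP p2 := by
      rw [List.countP_filter, hc1]
      omega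
    rw [hcount, pvTakeCountP p2 _ hdc2 _ (hs.filter _), List.filter_filter]
    apply List.filter_congr
    intro i _
    by_cases h1 : key i ≤ lo <;> by_cases h2 : key i < hi <;>
      simp [hp1, hp2, h1, h2] <;> omega
  · have hle : l.countP p2 ≤ l.countP p1 := by
      apply List.countP_mono_left
      intro i _ h
      simp only [hp2, decide_eq_true_eq] at h
      simp only [hp1, decide_eq_true_eq]
      omega
    have : l.countP p2 - l.countP p1 = 0 := by omega
    rw [this, List.take_zero]
    symm
    rw [List.filter_eq_nil_iff]
    intro i _
    simp only [decide_eq_true_eq, not_and]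
    intro h
    omega

-- ---------- pushing the index selection back to a_list order ----------

theorem pvRangeFilterMap (a : List Int) (P : Int → Bool) :
    ((List.range a.length).filter (fun k => P (a.getD k 0))).map (fun k => a.getD k 0)
      = a.filter P := by
  induction a with
  | nil => simp
  | cons x t ih =>
    rw [List.length_cons, List.range_succ_eq_map, List.filter_cons]
    simp only [List.getD_cons_zero]
    have h1 : ((List.range t.length).map Nat.succ).filter (fun k => P ((x :: t).getD k 0))
        = ((List.range t.length).filter (fun k => P (t.getD k 0))).map Nat.succ := by
      rw [List.filter_map]
      congr 1
    have h2 : ((fun k => (x :: t).getD k 0) ∘ Nat.succ) = fun k => t.getD k 0 := by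
      funext k; simp
    by_cases hP : P x = true
    · rw [if_pos hP, h1, List.map_cons, List.getD_cons_zero, List.map_map, h2, ih,
        List.filter_cons_of_pos hP]
    · rw [if_neg (by simp [hP]), h1, List.map_map, h2, ih, List.filter_cons_of_neg (by simp [hP])]

-- pyRange version: selecting by a predicate on the value and reading values back.
theorem pvPyRangeFilterMap (a : List Int) (P : Int → Bool) :
    ((PySem.List.pyRange 0 (a.length : Int) 1).filter
        (fun i => P (PySem.List.pyGetD a i 0))).map (fun i => PySem.List.pyGetD a i 0)
      = a.filter P := by
  rw [PySem.List.pyRange_one, List.filter_map, List.map_map]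
  have hcast : ∀ k : Nat, (0 : Int) + (k : Int) = ((k : Nat) : Int) := by intro k; omega
  have hfeq : ((fun i => P (PySem.List.pyGetD a i 0)) ∘ fun k : Nat => 0 + (k : Int))
      = fun k : Nat => P (a.getD k 0) := by
    funext k
    show P (PySem.List.pyGetD a (0 + (k : Int)) 0) = _
    rw [hcast k, PySem.List.pyGetD_natCast]
  have hgeq : ((fun i => PySem.List.pyGetD a i 0) ∘ fun k : Nat => 0 + (k : Int))
      = fun k : Nat => a.getD k 0 := by
    funext k
    show PySem.List.pyGetD a (0 + (k : Int)) 0 = _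
    rw [hcast k, PySem.List.pyGetD_natCast]
  rw [hfeq, hgeq]
  have htn : (((a.length : Int)) - 0).toNat = a.length := by omega
  rw [htn, pvRangeFilterMap]

-- Sorting the selected indices of the value-sorted index list restores a_list order.
theorem pvSelEq (a : List Int) (P : Int → Bool) :
    (PySem.List.sorted
        ((PySem.List.sorted (PySem.List.pyRange 0 (a.length : Int) 1)
            (fun i => PySem.List.pyGetD a i 0) false).filter (fun i => P (PySem.List.pyGetD a i 0)))
        (fun i => i) false).map (fun i => PySem.List.pyGetD a i 0)
      = a.filter P := by
  set key : Int → Int := fun i => PySem.List.pyGetD a i 0 with hkey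
  set ord := PySem.List.sorted (PySem.List.pyRange 0 (a.length : Int) 1) key false with hord
  have hperm : ord.Perm (PySem.List.pyRange 0 (a.length : Int) 1) :=
    PySem.List.sorted_perm _ _ _
  set fl := (PySem.List.pyRange 0 (a.length : Int) 1).filter (fun i => P (key i)) with hfl
  have hp : fl.Perm (ord.filter (fun i => P (key i))) := (hperm.filter _).symm
  have hlt : fl.Pairwise (fun i j => i < j) := by
    rw [hfl, PySem.List.pyRange_one]
    apply List.Pairwise.filter
    rw [List.pairwise_map]
    exact List.pairwise_lt_range.imp (by intro i j h; omega)
  rw [PySem.List.sorted_eq_of_perm_of_pairwise_lt _ fl (fun i => i) hp hlt]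
  rw [hfl, hkey]
  exact pvPyRangeFilterMap a P

-- ---------- facts about ord / vals ----------

theorem pvOrdPairwise (a : List Int) :
    (PySem.List.sorted (PySem.List.pyRange 0 (a.length : Int) 1)
        (fun i => PySem.List.pyGetD a i 0) false).Pairwise
      (fun i j => PySem.List.pyGetD a i 0 ≤ PySem.List.pyGetD a j 0) :=
  PySem.List.sorted_pairwise _ _

theorem pvValsPerm (a : List Int) :
    ((PySem.List.sorted (PySem.List.pyRange 0 (a.length : Int) 1)
        (fun i => PySem.List.pyGetD a i 0) false).map (fun i => PySem.List.pyGetD a i 0)).Perm a := by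
  have h1 := (PySem.List.sorted_perm (PySem.List.pyRange 0 (a.length : Int) 1)
    (fun i => PySem.List.pyGetD a i 0) false).map (fun i => PySem.List.pyGetD a i 0)
  have h2 : (PySem.List.pyRange 0 (a.length : Int) 1).map (fun i => PySem.List.pyGetD a i 0) = a := by
    have := PySem.List.map_pyGetD_pyRange_zero a 0
    simpa [PySem.List.len] using this
  rw [h2] at h1
  exact h1

-- pyGetD l (-1) is the last element, which on a sorted list bounds every element.
theorem pvLastMax (l : List Int) (hl : l ≠ []) (hs : l.Pairwise (· ≤ ·)) :
    PySem.List.pyGetD l (-1) 0 ∈ l ∧ ∀ y ∈ l, y ≤ PySem.List.pyGetD l (-1) 0 := by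
  have hlen : 0 < l.length := List.length_pos_iff.mpr hl
  have hget : PySem.List.pyGetD l (-1) 0 = l[l.length - 1]'(by omega) := by
    simp only [PySem.List.pyGetD, PySem.List.pyGet?, PySem.List.pyIdx?]
    have h1 : (-(-1 : Int)).toNat = 1 := by decide
    rw [if_neg (by omega), if_pos (by omega), h1]
    show ((l[l.length - 1]?).getD 0) = _
    rw [List.getElem?_eq_getElem (by omega), Option.getD_some]
  constructor
  · rw [hget]; exact List.getElem_mem _
  · intro y hy
    obtain ⟨i, hi, hiy⟩ := List.getElem_of_mem hy
    rw [hget, ← hiy]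
    rcases Nat.lt_or_ge i (l.length - 1) with h | h
    · exact List.pairwise_iff_getElem.mp hs i (l.length - 1) hi (by omega) h
    · have : i = l.length - 1 := by omega
      subst this; rfl

-- ---------- per-interval block lemmas ----------

theorem pvBisR_eq (a : List Int) (ord vals : List Int)
    (hord : ord = PySem.List.sorted (PySem.List.pyRange 0 (a.length : Int) 1)
      (fun i => PySem.List.pyGetD a i 0) false)
    (hvals : vals = ord.map (fun i => PySem.List.pyGetD a i 0)) (x : Int) :
    pvBisLoop vals x false 0 a.length
      = ord.countP (fun i => decide (PySem.List.pyGetD a i 0 ≤ x)) := by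
  have hpair : vals.Pairwise (· ≤ ·) := by
    rw [hvals, List.pairwise_map]
    exact hord ▸ pvOrdPairwise a
  have hlen : vals.length = a.length := by
    rw [hvals, List.length_map, hord,
      (PySem.List.sorted_perm _ _ _).length_eq, PySem.List.pyRange_one]
    simp
  rw [← hlen, pvBisLoop_eq vals x false hpair, hvals, List.countP_map]
  apply List.countP_congr
  intro i _
  by_cases h : PySem.List.pyGetD a i 0 ≤ x
  · by_cases h2 : PySem.List.pyGetD a i 0 < x
    · simp [Function.comp_def, h, h2]
    · have h3 : PySem.List.pyGetD a i 0 = x := by omega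
      simp [Function.comp_def, h, h2, h3]
  · have h2 : ¬ PySem.List.pyGetD a i 0 < x := by omega
    have h3 : ¬ PySem.List.pyGetD a i 0 = x := by omega
    simp [Function.comp_def, h, h2, h3]

theorem pvBisL_eq (a : List Int) (ord vals : List Int)
    (hord : ord = PySem.List.sorted (PySem.List.pyRange 0 (a.length : Int) 1)
      (fun i => PySem.List.pyGetD a i 0) false)
    (hvals : vals = ord.map (fun i => PySem.List.pyGetD a i 0)) (x : Int) :
    pvBisLoop vals x true 0 a.length
      = ord.countP (fun i => decide (PySem.List.pyGetD a i 0 < x)) := by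
  have hpair : vals.Pairwise (· ≤ ·) := by
    rw [hvals, List.pairwise_map]
    exact hord ▸ pvOrdPairwise a
  have hlen : vals.length = a.length := by
    rw [hvals, List.length_map, hord,
      (PySem.List.sorted_perm _ _ _).length_eq, PySem.List.pyRange_one]
    simp
  rw [← hlen, pvBisLoop_eq vals x true hpair, hvals, List.countP_map]
  apply List.countP_congr
  intro i _
  simp [Function.comp_def]

theorem pvBlock (a : List Int) (ord vals : List Int)
    (hord : ord = PySem.List.sorted (PySem.List.pyRange 0 (a.length : Int) 1)
      (fun i => PySem.List.pyGetD a i 0) false)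
    (hvals : vals = ord.map (fun i => PySem.List.pyGetD a i 0)) (lo hi : Int) :
    (PySem.List.sorted (PySem.List.slice ord
        (some ((pvBisLoop vals lo false 0 a.length : Nat) : Int))
        (some ((pvBisLoop vals hi true 0 a.length : Nat) : Int)))
      (fun i => i) false).map (fun i => PySem.List.pyGetD a i 0)
    = a.filter (fun x => decide (lo < x ∧ x < hi)) := by
  rw [pvBisR_eq a ord vals hord hvals lo, pvBisL_eq a ord vals hord hvals hi,
    PySem.List.slice_natCast]
  have hpair : ord.Pairwise (fun i j => PySem.List.pyGetD a i 0 ≤ PySem.List.pyGetD a j 0) :=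
    hord ▸ pvOrdPairwise a
  rw [pvSliceFilter (fun i => PySem.List.pyGetD a i 0) lo hi ord hpair, hord]
  exact pvSelEq a (fun x => decide (lo < x ∧ x < hi))

-- the same fact with the 'some' applied inside the map (the shape B's loop body has)
theorem pvBlockS (a : List Int) (ord vals : List Int)
    (hord : ord = PySem.List.sorted (PySem.List.pyRange 0 (a.length : Int) 1)
      (fun i => PySem.List.pyGetD a i 0) false)
    (hvals : vals = ord.map (fun i => PySem.List.pyGetD a i 0)) (lo hi : Int) :
    (PySem.List.sorted (PySem.List.slice ord
        (some ((pvBisLoop vals lo false 0 a.length : Nat) : Int))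
        (some ((pvBisLoop vals hi true 0 a.length : Nat) : Int)))
      (fun i => i) false).map (fun i => some (PySem.List.pyGetD a i 0))
    = (a.filter (fun x => decide (lo < x ∧ x < hi))).map some := by
  rw [← pvBlock a ord vals hord hvals lo hi, List.map_map]
  rfl

theorem pvTailEq (a : List Int) (ord vals : List Int)
    (hord : ord = PySem.List.sorted (PySem.List.pyRange 0 (a.length : Int) 1)
      (fun i => PySem.List.pyGetD a i 0) false)
    (hvals : vals = ord.map (fun i => PySem.List.pyGetD a i 0)) (lo : Int) :
    (PySem.List.sorted (PySem.List.slice ord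
        (some ((pvBisLoop vals lo false 0 a.length : Nat) : Int)) none)
      (fun i => i) false).map (fun i => PySem.List.pyGetD a i 0)
    = a.filter (fun x => decide (lo < x)) := by
  rw [pvBisR_eq a ord vals hord hvals lo,
    PySem.List.slice_from ord (by positivity), Int.toNat_natCast]
  have hpair : ord.Pairwise (fun i j => PySem.List.pyGetD a i 0 ≤ PySem.List.pyGetD a j 0) :=
    hord ▸ pvOrdPairwise a
  have hdc : ∀ i j, PySem.List.pyGetD a i 0 ≤ PySem.List.pyGetD a j 0 →
      decide (PySem.List.pyGetD a j 0 ≤ lo) = true →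
      decide (PySem.List.pyGetD a i 0 ≤ lo) = true := by
    intro i j hij h
    simp only [decide_eq_true_eq] at h ⊢
    omega
  rw [pvDropCountP _ _ hdc ord hpair]
  have hfc : ord.filter (fun i => !decide (PySem.List.pyGetD a i 0 ≤ lo))
      = ord.filter (fun i => decide (lo < PySem.List.pyGetD a i 0)) := by
    apply List.filter_congr
    intro i _
    by_cases h : PySem.List.pyGetD a i 0 ≤ lo <;> simp [h] <;> omega
  rw [hfc, hord]
  exact pvSelEq a (fun x => decide (lo < x))

-- ---------- B-side row fold ----------

theorem pv_rows_pyRange (l : List Int) (F G : Int → List (Option Int)) (x y : List (Option Int)) :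
    l.foldl (fun r k => (r.1 ++ F k, r.2 ++ G k)) (x, y)
      = (x ++ l.flatMap F, y ++ l.flatMap G) := by
  induction l generalizing x y with
  | nil => simp
  | cons k t ih => simp [ih]

-- The two row pieces of one interval block are the projections of pvSeg.
theorem pvBlock_fst (q1 q2 : Int) (a : List Int) :
    List.replicate (if (a.filter (fun x => decide (q1 < x ∧ x < q2))).map some
          = ([] : List (Option Int)) then [(none : Option Int)]
        else (a.filter (fun x => decide (q1 < x ∧ x < q2))).map some).length (some q1)
      = (pvSeg q1 q2 a).map (fun p => some p.1) := by
  by_cases h : a.filter (fun x => decide (q1 < x ∧ x < q2)) = []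
  · have hmap : (a.filter (fun x => decide (q1 < x ∧ x < q2))).map some = ([] : List (Option Int)) := by
      rw [h]; rfl
    have hl : (a.filter (fun x => decide (q1 < x ∧ x < q2))).length = 0 := by rw [h]; rfl
    rw [if_pos hmap]
    simp only [pvSeg]
    rw [if_pos hl]
    rfl
  · have hmap : ¬ (a.filter (fun x => decide (q1 < x ∧ x < q2))).map some = ([] : List (Option Int)) := by
      simpa using h
    have hl : ¬ (a.filter (fun x => decide (q1 < x ∧ x < q2))).length = 0 := by
      simpa [List.length_eq_zero_iff] using h
    rw [if_neg hmap]
    simp only [pvSeg]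
    rw [if_neg hl, List.length_map, List.map_map]
    have hc : ((fun p : Int × Option Int => some p.1) ∘ fun x : Int => (q1, some x))
        = fun _ : Int => some q1 := rfl
    rw [hc, List.map_const']

theorem pvBlock_snd (q1 q2 : Int) (a : List Int) :
    (if (a.filter (fun x => decide (q1 < x ∧ x < q2))).map some
        = ([] : List (Option Int)) then [(none : Option Int)]
      else (a.filter (fun x => decide (q1 < x ∧ x < q2))).map some)
      = (pvSeg q1 q2 a).map (fun p => p.2) := by
  by_cases h : a.filter (fun x => decide (q1 < x ∧ x < q2)) = []
  · have hmap : (a.filter (fun x => decide (q1 < x ∧ x < q2))).map some = ([] : List (Option Int)) := by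
      rw [h]; rfl
    have hl : (a.filter (fun x => decide (q1 < x ∧ x < q2))).length = 0 := by rw [h]; rfl
    rw [if_pos hmap]
    simp only [pvSeg]
    rw [if_pos hl]
    rfl
  · have hmap : ¬ (a.filter (fun x => decide (q1 < x ∧ x < q2))).map some = ([] : List (Option Int)) := by
      simpa using h
    have hl : ¬ (a.filter (fun x => decide (q1 < x ∧ x < q2))).length = 0 := by
      simpa [List.length_eq_zero_iff] using h
    rw [if_neg hmap]
    simp only [pvSeg]
    rw [if_neg hl, List.map_map]
    rfl

-- ===== VERDICT (by name: the statement is the Claim_ definition above) =====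
theorem set_qa_order_spec : Claim_equal_set_qa_order := by
  intro q a _ hpre
  unfold Spec_set_qa_order
  have hne : q ++ a ≠ [] := by
    intro h; exact hpre (List.append_eq_nil_iff.mp h).1
  obtain ⟨m, hm⟩ : ∃ m, PySem.List.max? (q ++ a) (fun x => x) = some m := by
    rcases hq : PySem.List.max? (q ++ a) (fun x => x) with _ | m
    · exact absurd ((PySem.List.max?_eq_none_iff _ _).mp hq) hne
    · exact ⟨m, rfl⟩
  obtain ⟨mq, hmq⟩ : ∃ mq, PySem.List.max? q (fun x => x) = some mq := by
    rcases hq : PySem.List.max? q (fun x => x) with _ | mq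
    · exact absurd ((PySem.List.max?_eq_none_iff _ _).mp hq) hpre
    · exact ⟨mq, rfl⟩
  have hmem : m ∈ q ++ a := PySem.List.max?_mem hm
  simp only [set_qa_order, set_qa_order_alt, hm, hmq]
  set ord := PySem.List.sorted (PySem.List.pyRange 0 (a.length : Int) 1)
    (fun i => PySem.List.pyGetD a i 0) false with hord
  set vals := ord.map (fun i => PySem.List.pyGetD a i 0) with hvals
  -- rewrite every interval block and the tail through the bisect lemmas
  rw [pv_order_structure_eq q a]
  simp only [pvBlockS a ord vals hord hvals, pvTailEq a ord vals hord hvals]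
  -- split the B-side row fold into the two flatMaps
  rw [pv_rows_pyRange _
    (fun k => List.replicate (if (a.filter (fun x => decide (PySem.List.pyGetD q k 0 < x ∧ x < PySem.List.pyGetD q (k + 1) 0))).map some = ([] : List (Option Int)) then [(none : Option Int)] else (a.filter (fun x => decide (PySem.List.pyGetD q k 0 < x ∧ x < PySem.List.pyGetD q (k + 1) 0))).map some).length (some (PySem.List.pyGetD q k 0)))
    (fun k => if (a.filter (fun x => decide (PySem.List.pyGetD q k 0 < x ∧ x < PySem.List.pyGetD q (k + 1) 0))).map some = ([] : List (Option Int)) then [(none : Option Int)] else (a.filter (fun x => decide (PySem.List.pyGetD q k 0 < x ∧ x < PySem.List.pyGetD q (k + 1) 0))).map some)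
    [] []]
  have hF : (PySem.List.pyRange 0 ((q.length : Int) - 1) 1).flatMap
      (fun k => List.replicate (if (a.filter (fun x => decide (PySem.List.pyGetD q k 0 < x ∧ x < PySem.List.pyGetD q (k + 1) 0))).map some = ([] : List (Option Int)) then [(none : Option Int)] else (a.filter (fun x => decide (PySem.List.pyGetD q k 0 < x ∧ x < PySem.List.pyGetD q (k + 1) 0))).map some).length (some (PySem.List.pyGetD q k 0)))
      = (pvMain q a).map (fun p => some p.1) := by
    rw [← pv_pyRange_flatMap q a, List.map_flatMap]
    exact List.flatMap_congr (fun k _ => pvBlock_fst _ _ a)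
  have hG : (PySem.List.pyRange 0 ((q.length : Int) - 1) 1).flatMap
      (fun k => if (a.filter (fun x => decide (PySem.List.pyGetD q k 0 < x ∧ x < PySem.List.pyGetD q (k + 1) 0))).map some = ([] : List (Option Int)) then [(none : Option Int)] else (a.filter (fun x => decide (PySem.List.pyGetD q k 0 < x ∧ x < PySem.List.pyGetD q (k + 1) 0))).map some)
      = (pvMain q a).map (fun p => p.2) := by
    rw [← pv_pyRange_flatMap q a, List.map_flatMap]
    exact List.flatMap_congr (fun k _ => pvBlock_snd _ _ a)
  rw [hF, hG]
  simp only [List.nil_append]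
  -- the tail condition of B is 'm ∈ a' of A
  have hvperm : vals.Perm a := by rw [hvals, hord]; exact pvValsPerm a
  have hvpair : vals.Pairwise (· ≤ ·) := by
    rw [hvals, List.pairwise_map]
    exact hord ▸ pvOrdPairwise a
  have hiff : m ∈ a ↔ (vals ≠ [] ∧ mq ≤ PySem.List.pyGetD vals (-1) 0) := by
    constructor
    · intro hma
      have hvne : vals ≠ [] := by
        intro hv
        rw [hv] at hvperm
        rw [hvperm.symm.mem_iff] at hma
        simp at hma
      obtain ⟨hlmem, hlmax⟩ := pvLastMax vals hvne hvpair
      refine ⟨hvne, ?_⟩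
      have hmqm : mq ≤ m := by
        have := PySem.List.max?_isMax hm mq (List.mem_append.mpr (Or.inl (PySem.List.max?_mem hmq)))
        simpa using this
      have hmla : m ≤ PySem.List.pyGetD vals (-1) 0 :=
        hlmax m (hvperm.symm.mem_iff.mp hma)
      omega
    · rintro ⟨hvne, hle⟩
      obtain ⟨hlmem, hlmax⟩ := pvLastMax vals hvne hvpair
      set la := PySem.List.pyGetD vals (-1) 0 with hla
      have hlaa : la ∈ a := hvperm.mem_iff.mp hlmem
      have hml : m ≤ la := by
        rcases List.mem_append.mp hmem with h | h
        · have := PySem.List.max?_isMax hmq m h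
          simp only at this
          omega
        · exact hlmax m (hvperm.mem_iff.mpr h)
      have hlam : la ≤ m := by
        have := PySem.List.max?_isMax hm la (List.mem_append.mpr (Or.inr hlaa))
        simpa using this
      have : m = la := le_antisymm hml hlam
      rw [this]
      exact hlaa
  by_cases hma : m ∈ a
  · rw [if_pos hma, if_pos (hiff.mp hma)]
    set tl := a.filter (fun x => decide (PySem.List.pyGetD q (-1) 0 < x)) with htl
    rcases hos : pvMain q a ++ tl.map (fun x => (PySem.List.pyGetD q (-1) 0, some x)) with _ | ⟨p, os'⟩
    · have h0 : pvMain q a = [] ∧ tl = [] := by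
        constructor
        · exact (List.append_eq_nil_iff.mp hos).1
        · have := (List.append_eq_nil_iff.mp hos).2
          simpa using this
      simp [h0.1, h0.2]
    · have h1 : (pvMain q a).map (fun p => some p.1)
          ++ List.replicate tl.length (some (PySem.List.pyGetD q (-1) 0))
          = (p :: os').map (fun p => some p.1) := by
        rw [← hos, List.map_append, List.map_map]
        simp only [Function.comp_def]
        rw [List.map_const']
      have h2 : (pvMain q a).map (fun p => p.2) ++ tl.map some
          = (p :: os').map (fun p => p.2) := by
        rw [← hos, List.map_append, List.map_map]
        rfl
      rw [h1, h2]
      simp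
  · have hmq' : m ∈ q := by
      rcases List.mem_append.mp hmem with h | h
      · exact h
      · exact absurd h hma
    rw [if_neg hma, if_pos hmq', if_neg (fun hc => hma (hiff.mpr hc))]
    rcases hos : pvMain q a ++ [(PySem.List.pyGetD q (-1) 0, (none : Option Int))] with _ | ⟨p, os'⟩
    · exact absurd hos (by simp)
    · have h1 : (pvMain q a).map (fun p => some p.1) ++ [some (PySem.List.pyGetD q (-1) 0)]
          = (p :: os').map (fun p => some p.1) := by
        rw [← hos, List.map_append]; rfl
      have h2 : (pvMain q a).map (fun p => p.2) ++ [(none : Option Int)]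
          = (p :: os').map (fun p => p.2) := by
        rw [← hos, List.map_append]; rfl
      rw [h1, h2]
      simp
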